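-- pv_equiv track=rewrite | github.com/moomanchuu/SPHEREx-ML-marco-jame-proj | SPHEREx/SPHERExScripts.py | gen_globalmap_section_indexes
-- ===== SOURCE A (Python) =====
-- def gen_globalmap_section_indexes(section_size,sections_per_side):
--
--     # Initialize list to store the section position indices
--     section_position_idxs = []
--
--     # Loop through the base array and assign values to corresponding sectors in the expanded array
--     for i in range(sections_per_side):
--         for j in range(sections_per_side):
--             # Get the value for the current section
--             # Get the position indices for this section
--             section_positions = []
--             for row in range(i*section_size, (i+1)*section_size):
--                 for col in range(j*section_size, (j+1)*section_size):
--                     section_positions.append((row, col))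
--
--             section_position_idxs.append(section_positions)
--
--     return section_position_idxs
-- ===== SOURCE B (Python) =====
-- def gen_globalmap_section_indexes(section_size, sections_per_side):
--     # Bucketing: one row-major sweep over the whole global grid; each cell is
--     # routed to its section's bucket by arithmetic on its coordinates.
--     if sections_per_side <= 0:
--         return []
--     buckets = [[] for _ in range(sections_per_side * sections_per_side)]
--     n = section_size * sections_per_side
--     for row in range(n):
--         for col in range(n):
--             sid = (row // section_size) * sections_per_side + (col // section_size)
--             buckets[sid].append((row, col))
--     return buckets
-- ===== Notes on version B (the rewrite author's own statement) =====
-- stated objective: alternative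
-- what changed: Instead of emitting sections one by one with four nested loops, B makes a single row-major sweep over the whole global grid and routes each cell into its section's bucket computed arithmetically (row//section_size)*sections_per_side + col//section_size.
import Mathlib
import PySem

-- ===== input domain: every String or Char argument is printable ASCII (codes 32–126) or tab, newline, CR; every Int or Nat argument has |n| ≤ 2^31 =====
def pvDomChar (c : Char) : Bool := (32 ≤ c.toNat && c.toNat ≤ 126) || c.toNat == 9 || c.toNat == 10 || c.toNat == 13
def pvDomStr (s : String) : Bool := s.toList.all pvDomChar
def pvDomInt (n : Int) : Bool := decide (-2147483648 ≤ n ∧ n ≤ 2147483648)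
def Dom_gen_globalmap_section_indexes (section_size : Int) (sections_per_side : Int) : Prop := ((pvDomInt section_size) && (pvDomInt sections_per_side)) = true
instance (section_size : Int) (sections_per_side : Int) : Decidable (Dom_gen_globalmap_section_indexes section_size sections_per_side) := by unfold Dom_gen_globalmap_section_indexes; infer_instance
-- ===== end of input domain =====

-- B replaces A's four nested per-section loops by one row-major sweep over the whole
-- global grid, routing each cell into its section's bucket computed arithmetically
-- (objective: alternative decomposition, same asymptotic cost).

-- ===== PORT A =====
def gen_globalmap_section_indexes (section_size : Int) (sections_per_side : Int) : List (List (Int × Int)) :=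
  (PySem.List.pyRange 0 sections_per_side 1).foldl (fun section_position_idxs i =>
    (PySem.List.pyRange 0 sections_per_side 1).foldl (fun section_position_idxs j =>
      let section_positions :=
        (PySem.List.pyRange (i * section_size) ((i + 1) * section_size) 1).foldl (fun sp row =>
          (PySem.List.pyRange (j * section_size) ((j + 1) * section_size) 1).foldl (fun sp col =>
            sp ++ [(row, col)]) sp) []
      section_position_idxs ++ [section_positions]) section_position_idxs) []

-- ===== PORT B =====
-- 'buckets[sid].append(x)' is ported as pySetD/pyGetD at index sid; sid is always a
-- valid nonnegative index whenever the loop body runs, so the total forms are exact.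
def gen_globalmap_section_indexes_alt (section_size : Int) (sections_per_side : Int) : List (List (Int × Int)) :=
  if sections_per_side ≤ 0 then [] else
  let buckets0 := (PySem.List.pyRange 0 (sections_per_side * sections_per_side) 1).map
    (fun _ => ([] : List (Int × Int)))
  let n := section_size * sections_per_side
  (PySem.List.pyRange 0 n 1).foldl (fun bs row =>
    (PySem.List.pyRange 0 n 1).foldl (fun bs col =>
      let sid := PySem.Int.floordiv row section_size * sections_per_side +
                 PySem.Int.floordiv col section_size
      PySem.List.pySetD bs sid (PySem.List.pyGetD bs sid [] ++ [(row, col)])) bs) buckets0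

-- ===== PRECONDITION & SPEC =====
def Spec_gen_globalmap_section_indexes (section_size : Int) (sections_per_side : Int) (out : List (List (Int × Int))) : Prop := out = gen_globalmap_section_indexes_alt section_size sections_per_side
instance (section_size : Int) (sections_per_side : Int) (out : List (List (Int × Int))) : Decidable (Spec_gen_globalmap_section_indexes section_size sections_per_side out) := by unfold Spec_gen_globalmap_section_indexes; infer_instance

-- ===== CLAIM (what is proved, stated in full; the proofs are below) =====
def Claim_equal_gen_globalmap_section_indexes : Prop := ∀ (section_size : Int) (sections_per_side : Int), Dom_gen_globalmap_section_indexes section_size sections_per_side → Spec_gen_globalmap_section_indexes section_size sections_per_side (gen_globalmap_section_indexes section_size sections_per_side)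

-- ===== LEMMAS AND PROOFS =====

-- A's nested appending folds, in flatMap/map form
lemma portA_eq (ss sps : Int) :
    gen_globalmap_section_indexes ss sps
    = (PySem.List.pyRange 0 sps 1).flatMap (fun i =>
        (PySem.List.pyRange 0 sps 1).map (fun j =>
          (PySem.List.pyRange (i * ss) ((i + 1) * ss) 1).flatMap (fun row =>
            (PySem.List.pyRange (j * ss) ((j + 1) * ss) 1).map (fun col => (row, col))))) := by
  unfold gen_globalmap_section_indexes
  simp only [PySem.List.foldl_append_singleton_eq_map, PySem.List.foldl_append_eq_flatMap,
    List.nil_append]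

-- map over range(a*b) re-indexed as a double loop
lemma range_mul_map {α : Type} (a b : Nat) (g : Nat → α) :
    (List.range (a * b)).map g
    = (List.range a).flatMap (fun i => (List.range b).map (fun j => g (i * b + j))) := by
  induction a with
  | zero => simp
  | succ a ih =>
    rw [Nat.succ_mul, List.range_add, List.map_append, ih, List.range_succ,
      List.flatMap_append]
    simp [List.map_map, Function.comp, Nat.add_comm]

-- flatMap of a guarded body is a flatMap over the filtered list
lemma flatMap_ite_nil {α β : Type} (l : List α) (p : α → Bool) (g : α → List β) :
    l.flatMap (fun x => if p x then g x else []) = (l.filter p).flatMap g := by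
  induction l with
  | nil => rfl
  | cons x l ih =>
    by_cases h : p x <;> simp [h, ih]

-- Euclidean uniqueness of the (quotient, remainder) pair
lemma euclid_unique (s a b a' b' : Int) (hs : 0 < s) (hb : 0 ≤ b) (hb2 : b < s)
    (hb' : 0 ≤ b') (hb2' : b' < s) : a * s + b = a' * s + b' ↔ a = a' ∧ b = b' := by
  constructor
  · intro h
    have h1 : (a - a') * s = b' - b := by ring_nf; linarith
    have h2 : a = a' := by nlinarith [h1]
    exact ⟨h2, by nlinarith⟩
  · rintro ⟨rfl, rfl⟩; rfl

-- floor-division bounds for cells of the global grid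
lemma fdiv_bounds (ss sps c : Int) (hss : 0 < ss) (hc0 : 0 ≤ c) (hcn : c < ss * sps) :
    0 ≤ PySem.Int.floordiv c ss ∧ PySem.Int.floordiv c ss < sps := by
  rw [PySem.Int.floordiv_eq_ediv_of_pos hss]
  refine ⟨Int.ediv_nonneg hc0 (le_of_lt hss), ?_⟩
  rw [Int.ediv_lt_iff_lt_mul hss]
  linarith [hcn]

-- the rows of the global range whose floor-div quotient is i form exactly section i's row range
lemma filter_range_fdiv (ss n i : Int) (hss : 0 < ss) (h0 : 0 ≤ i * ss)
    (h1 : (i + 1) * ss ≤ n) :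
    (PySem.List.pyRange 0 n 1).filter (fun r => PySem.Int.floordiv r ss == i)
    = PySem.List.pyRange (i * ss) ((i + 1) * ss) 1 := by
  rw [PySem.List.pyRange_one_append 0 (i * ss) n h0 (by linarith),
      PySem.List.pyRange_one_append (i * ss) ((i + 1) * ss) n (by nlinarith) h1,
      List.filter_append, List.filter_append]
  have hmid : (PySem.List.pyRange (i * ss) ((i + 1) * ss) 1).filter
      (fun r => PySem.Int.floordiv r ss == i)
      = PySem.List.pyRange (i * ss) ((i + 1) * ss) 1 := by
    apply List.filter_eq_self.mpr
    intro r hr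
    rw [PySem.List.mem_pyRange_one] at hr
    simp only [beq_iff_eq]
    rw [PySem.Int.floordiv_eq_iff_of_pos hss]
    exact ⟨hr.1, hr.2⟩
  have hlo : (PySem.List.pyRange 0 (i * ss) 1).filter
      (fun r => PySem.Int.floordiv r ss == i) = [] := by
    apply List.filter_eq_nil_iff.mpr
    intro r hr
    rw [PySem.List.mem_pyRange_one] at hr
    simp only [beq_iff_eq]
    intro h
    rw [PySem.Int.floordiv_eq_iff_of_pos hss] at h
    linarith [h.1, hr.2]
  have hhi : (PySem.List.pyRange ((i + 1) * ss) n 1).filter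
      (fun r => PySem.Int.floordiv r ss == i) = [] := by
    apply List.filter_eq_nil_iff.mpr
    intro r hr
    rw [PySem.List.mem_pyRange_one] at hr
    simp only [beq_iff_eq]
    intro h
    rw [PySem.Int.floordiv_eq_iff_of_pos hss] at h
    linarith [h.2, hr.1]
  rw [hmid, hlo, hhi, List.nil_append, List.append_nil]

-- getD of a list of empty buckets
lemma getD_const_nil {α : Type} (l : List α) (k : Nat) :
    ((l.map (fun _ => ([] : List (Int × Int)))).getD k []) = [] := by
  rcases Nat.lt_or_ge k l.length with h | h
  · rw [List.getD_eq_getElem _ _ (by simpa using h)]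
    simp
  · rw [List.getD_eq_default _ _ (by simpa using h)]

-- the bucketing fold, characterised: each bucket collects (in order) the cells routed to it
lemma fold_buckets (f : Int × Int → Int) :
    ∀ (L : List (Int × Int)) (b : List (List (Int × Int))),
    (∀ p ∈ L, 0 ≤ f p ∧ f p < (b.length : Int)) →
    L.foldl (fun bs p =>
      PySem.List.pySetD bs (f p) (PySem.List.pyGetD bs (f p) [] ++ [p])) b
    = (List.range b.length).map (fun k => b.getD k [] ++ L.filter (fun p => f p == (k : Int))) := by
  intro L
  induction L with
  | nil =>
    intro b _
    simp only [List.foldl_nil, List.filter_nil, List.append_nil]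
    apply List.ext_getElem (by simp)
    intro k h1 h2
    simp [List.getD_eq_getElem?_getD, List.getElem?_eq_getElem h1]
  | cons p L ih =>
    intro b hb
    obtain ⟨hf0, hfl⟩ := hb p (List.mem_cons_self)
    have hset : PySem.List.pySetD b (f p) (PySem.List.pyGetD b (f p) [] ++ [p])
        = b.set (f p).toNat (b.getD (f p).toNat [] ++ [p]) := by
      rw [PySem.List.pySetD_of_nonneg _ _ hf0,
        PySem.List.pyGetD_eq_getElem _ _ hf0 (by simpa using hfl),
        List.getD_eq_getElem b [] (by omega)]
    rw [List.foldl_cons, hset, ih _ (by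
      intro q hq
      have := hb q (List.mem_cons_of_mem _ hq)
      simpa using this)]
    apply List.ext_getElem (by simp)
    intro k hk1 hk2
    simp only [List.getElem_map, List.getElem_range]
    have hklen : k < b.length := by simpa using hk1
    have hfp : (f p).toNat < b.length := by omega
    rw [List.getD_eq_getElem _ [] (by simpa using hklen),
        List.getD_eq_getElem b [] hklen,
        List.getElem_set]
    by_cases h : f p = (k : Int)
    · have hnat : (f p).toNat = k := by omega
      rw [hnat, if_pos rfl, List.getD_eq_getElem b [] hklen]
      have hbeq : (f p == (k : Int)) = true := by simp [h]
      simp [hbeq, List.append_assoc]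
    · have hnat : (f p).toNat ≠ k := by omega
      rw [if_neg hnat]
      have hbeq : (f p == (k : Int)) = false := by simp [h]
      simp [hbeq]

-- one section of A, as a filter of the global row-major cell list
lemma section_filter (ss sps i j : Int) (hss : 0 < ss) (hsps : 0 < sps)
    (hi0 : 0 ≤ i) (hi1 : i < sps) (hj0 : 0 ≤ j) (hj1 : j < sps) :
    ((PySem.List.pyRange 0 (ss * sps) 1).flatMap (fun row =>
      (PySem.List.pyRange 0 (ss * sps) 1).map (fun col => (row, col)))).filter
      (fun p => PySem.Int.floordiv p.1 ss * sps + PySem.Int.floordiv p.2 ss == i * sps + j)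
    = (PySem.List.pyRange (i * ss) ((i + 1) * ss) 1).flatMap (fun row =>
        (PySem.List.pyRange (j * ss) ((j + 1) * ss) 1).map (fun col => (row, col))) := by
  rw [List.filter_flatMap]
  have hstep : ∀ row ∈ PySem.List.pyRange 0 (ss * sps) 1,
      ((PySem.List.pyRange 0 (ss * sps) 1).map (fun col => (row, col))).filter
        (fun p => PySem.Int.floordiv p.1 ss * sps + PySem.Int.floordiv p.2 ss == i * sps + j)
      = if PySem.Int.floordiv row ss == i then
          (PySem.List.pyRange (j * ss) ((j + 1) * ss) 1).map (fun col => (row, col)) else [] := by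
    intro row _
    rw [List.filter_map]
    have hfilt : (PySem.List.pyRange 0 (ss * sps) 1).filter
        ((fun p => PySem.Int.floordiv p.1 ss * sps + PySem.Int.floordiv p.2 ss
          == i * sps + j) ∘ (fun col => (row, col)))
        = (PySem.List.pyRange 0 (ss * sps) 1).filter
          (fun col => decide (PySem.Int.floordiv row ss = i ∧ PySem.Int.floordiv col ss = j)) := by
      apply List.filter_congr
      intro col hcol
      rw [PySem.List.mem_pyRange_one] at hcol
      obtain ⟨hc0, hcs⟩ := fdiv_bounds ss sps col hss hcol.1 hcol.2
      simp only [Function.comp, Bool.beq_eq_decide_eq]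
      rw [decide_eq_decide.mpr (euclid_unique sps _ _ _ _ hsps hc0 hcs hj0 hj1)]
    rw [hfilt]
    by_cases h : PySem.Int.floordiv row ss = i
    · have : (PySem.List.pyRange 0 (ss * sps) 1).filter
          (fun col => decide (PySem.Int.floordiv row ss = i ∧ PySem.Int.floordiv col ss = j))
          = (PySem.List.pyRange 0 (ss * sps) 1).filter
            (fun col => PySem.Int.floordiv col ss == j) := by
        apply List.filter_congr
        intro col _
        by_cases hc : PySem.Int.floordiv col ss = j <;> simp [h, hc]
      rw [this, filter_range_fdiv ss (ss * sps) j hss (by positivity) (by nlinarith)]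
      simp [h]
    · have : (PySem.List.pyRange 0 (ss * sps) 1).filter
          (fun col => decide (PySem.Int.floordiv row ss = i ∧ PySem.Int.floordiv col ss = j))
          = [] := by
        apply List.filter_eq_nil_iff.mpr
        intro col _
        simp [h]
      rw [this]
      simp [h]
  rw [List.flatMap_congr hstep]
  rw [flatMap_ite_nil, filter_range_fdiv ss (ss * sps) i hss (by positivity) (by nlinarith)]

-- ===== VERDICT (by name: the statement is the Claim_ definition above) =====
theorem gen_globalmap_section_indexes_spec : Claim_equal_gen_globalmap_section_indexes := by
  intro ss sps _
  unfold Spec_gen_globalmap_section_indexes gen_globalmap_section_indexes_alt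
  by_cases hsps : sps ≤ 0
  · rw [if_pos hsps, portA_eq]
    rw [PySem.List.pyRange_one_eq_nil (by linarith)]
    rfl
  · rw [not_le] at hsps
    rw [if_neg (by linarith)]
    dsimp only
    by_cases hss : ss ≤ 0
    · -- empty sections: A yields sps² empty lists, B never enters its loop
      rw [portA_eq]
      have hn : ss * sps ≤ 0 := mul_nonpos_of_nonpos_of_nonneg hss (le_of_lt hsps)
      rw [PySem.List.pyRange_one_eq_nil hn]
      simp only [List.foldl_nil]
      have hsec : ∀ i j : Int,
          (PySem.List.pyRange (i * ss) ((i + 1) * ss) 1).flatMap (fun row =>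
            (PySem.List.pyRange (j * ss) ((j + 1) * ss) 1).map (fun col => (row, col))) = [] := by
        intro i j
        rw [PySem.List.pyRange_one_eq_nil (show (i + 1) * ss ≤ i * ss by nlinarith)]
        simp
      have hA : (PySem.List.pyRange 0 sps 1).flatMap (fun i =>
          (PySem.List.pyRange 0 sps 1).map (fun j =>
            (PySem.List.pyRange (i * ss) ((i + 1) * ss) 1).flatMap (fun row =>
              (PySem.List.pyRange (j * ss) ((j + 1) * ss) 1).map (fun col => (row, col)))))
          = List.replicate (sps.toNat * sps.toNat) ([] : List (Int × Int)) := by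
        rw [List.eq_replicate_iff]
        constructor
        · simp [PySem.List.length_pyRange_one, List.length_flatMap]
        · intro l hl
          rw [List.mem_flatMap] at hl
          obtain ⟨i, _, hl⟩ := hl
          rw [List.mem_map] at hl
          obtain ⟨j, _, hl⟩ := hl
          rw [← hl, hsec]
      have hB : (PySem.List.pyRange 0 (sps * sps) 1).map
          (fun _ => ([] : List (Int × Int)))
          = List.replicate (sps.toNat * sps.toNat) ([] : List (Int × Int)) := by
        rw [List.eq_replicate_iff]
        constructor
        · rw [List.length_map, PySem.List.length_pyRange_one, Int.sub_zero,
            Int.toNat_mul (le_of_lt hsps) (le_of_lt hsps)]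
        · intro l hl
          rw [List.mem_map] at hl
          obtain ⟨_, _, hl⟩ := hl
          exact hl.symm
      rw [hA, hB]
    · rw [not_le] at hss
      -- main case: both sides equal the bucket characterisation
      set f : Int × Int → Int :=
        fun p => PySem.Int.floordiv p.1 ss * sps + PySem.Int.floordiv p.2 ss with hf
      set cells : List (Int × Int) :=
        (PySem.List.pyRange 0 (ss * sps) 1).flatMap (fun row =>
          (PySem.List.pyRange 0 (ss * sps) 1).map (fun col => (row, col))) with hcells
      have hmem : ∀ p ∈ cells, 0 ≤ p.1 ∧ p.1 < ss * sps ∧ 0 ≤ p.2 ∧ p.2 < ss * sps := by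
        intro p hp
        rw [hcells, List.mem_flatMap] at hp
        obtain ⟨r, hr, hp⟩ := hp
        rw [List.mem_map] at hp
        obtain ⟨c, hc, hp⟩ := hp
        rw [PySem.List.mem_pyRange_one] at hr hc
        rw [← hp]
        exact ⟨hr.1, hr.2, hc.1, hc.2⟩
      have hbounds : ∀ p ∈ cells, 0 ≤ f p ∧ f p <
          (((PySem.List.pyRange 0 (sps * sps) 1).map
            (fun _ => ([] : List (Int × Int)))).length : Int) := by
        intro p hp
        obtain ⟨h1, h2, h3, h4⟩ := hmem p hp
        obtain ⟨hr0, hrs⟩ := fdiv_bounds ss sps p.1 hss h1 h2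
        obtain ⟨hc0, hcs⟩ := fdiv_bounds ss sps p.2 hss h3 h4
        rw [List.length_map, PySem.List.length_pyRange_one]
        constructor
        · rw [hf]; positivity
        · rw [hf]
          have : (((sps * sps - 0).toNat : Int)) = sps * sps := by
            rw [Int.sub_zero, Int.toNat_of_nonneg (by positivity)]
          rw [this]
          nlinarith
      -- B's nested fold is the single bucketing fold over cells
      have hBfold : (PySem.List.pyRange 0 (ss * sps) 1).foldl (fun bs row =>
            (PySem.List.pyRange 0 (ss * sps) 1).foldl (fun bs col =>
              PySem.List.pySetD bs (f (row, col))
                (PySem.List.pyGetD bs (f (row, col)) [] ++ [(row, col)])) bs)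
            ((PySem.List.pyRange 0 (sps * sps) 1).map (fun _ => ([] : List (Int × Int))))
          = cells.foldl (fun bs p =>
              PySem.List.pySetD bs (f p) (PySem.List.pyGetD bs (f p) [] ++ [p]))
            ((PySem.List.pyRange 0 (sps * sps) 1).map (fun _ => ([] : List (Int × Int)))) := by
        rw [hcells, List.foldl_flatMap]
        congr 1
        funext bs row
        rw [List.foldl_map]
      rw [hBfold, fold_buckets f cells _ hbounds]
      -- rewrite the bucket characterisation as A's double loop
      have hlen : ((PySem.List.pyRange 0 (sps * sps) 1).map
          (fun _ => ([] : List (Int × Int)))).length = sps.toNat * sps.toNat := by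
        rw [List.length_map, PySem.List.length_pyRange_one, Int.sub_zero,
          Int.toNat_mul (le_of_lt hsps) (le_of_lt hsps)]
      rw [hlen, portA_eq]
      rw [range_mul_map sps.toNat sps.toNat]
      rw [PySem.List.pyRange_one 0 sps, Int.sub_zero]
      rw [List.flatMap_map]
      apply List.flatMap_congr
      intro i hi
      rw [List.mem_range] at hi
      simp only [List.map_map]
      apply List.map_congr_left
      intro j hj
      rw [List.mem_range] at hj
      have hcast : ((i * sps.toNat + j : Nat) : Int) = (i : Int) * sps + (j : Int) := by
        push_cast
        rw [Int.toNat_of_nonneg (le_of_lt hsps)]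
      rw [getD_const_nil, List.nil_append, hcast]
      simp only [Function.comp_apply, hf, zero_add]
      have := section_filter ss sps i j hss hsps
        (Int.natCast_nonneg i) (by omega) (Int.natCast_nonneg j) (by omega)
      rw [← hcells] at this
      exact this.symm
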